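-- pv_equiv track=rewrite | github.com/dagraham/tklr-dgraham | paginate_test.py | paginate_urgency_tasks
-- ===== SOURCE A (Python) =====
-- from itertools import product
-- from string import ascii_lowercase
--
-- def generate_tags():
--     for length in range(1, 3):
--         for combo in product(ascii_lowercase, repeat=length):
--             yield "".join(combo)
--
-- def paginate_urgency_tasks(tasks, per_page=10):
--     pages = []
--     tag_gen = generate_tags()
--     current_page = []
--     for i, (urgency, desc) in enumerate(tasks):
--         if i % per_page == 0 and current_page:
--             pages.append(current_page)
--             current_page = []
--             tag_gen = generate_tags()
--         tag = next(tag_gen)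
--         current_page.append((tag, urgency, desc))
--     if current_page:
--         pages.append(current_page)
--     return pages
-- ===== SOURCE B (Python) =====
-- from itertools import product
-- from string import ascii_lowercase
--
-- def generate_tags():
--     for length in range(1, 3):
--         for combo in product(ascii_lowercase, repeat=length):
--             yield "".join(combo)
--
-- def paginate_urgency_tasks(tasks, per_page=10):
--     tasks = list(tasks)
--     pages = []
--     while tasks:
--         chunk, tasks = tasks[:per_page], tasks[per_page:]
--         pages.append([(tag, urgency, desc)
--                       for tag, (urgency, desc) in zip(generate_tags(), chunk)])
--     return pages
-- ===== Notes on version B (the rewrite author's own statement) =====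
-- stated objective: simpler
-- what changed: Replaces A's single enumerate pass with a running page accumulator, modulo test and generator resets by a plain while loop that slices off one chunk at a time and zips a fresh tag generator with it.
-- outside the precondition, e.g. on paginate_urgency_tasks([(0, '')], -1): A returns [[('a', 0, '')]], B does not finish within the time limit
import Mathlib
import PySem

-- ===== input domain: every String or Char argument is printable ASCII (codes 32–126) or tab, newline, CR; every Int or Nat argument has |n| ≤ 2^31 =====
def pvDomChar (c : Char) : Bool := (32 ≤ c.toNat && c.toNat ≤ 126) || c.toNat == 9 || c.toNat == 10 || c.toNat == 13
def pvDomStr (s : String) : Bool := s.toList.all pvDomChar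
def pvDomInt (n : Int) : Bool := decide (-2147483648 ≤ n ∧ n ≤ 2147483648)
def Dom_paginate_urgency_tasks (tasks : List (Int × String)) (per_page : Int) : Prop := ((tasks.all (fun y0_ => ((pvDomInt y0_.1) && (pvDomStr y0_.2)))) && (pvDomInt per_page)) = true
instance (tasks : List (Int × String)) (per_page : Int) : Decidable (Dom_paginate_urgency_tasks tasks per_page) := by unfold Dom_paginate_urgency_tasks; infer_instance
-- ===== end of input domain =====

-- B replaces A's single enumerate pass (running page accumulator, modulo test, generator resets)
-- by a plain while loop that slices off one chunk at a time and zips a fresh tag generator with it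
-- (objective: simpler; return value only, neither program mutates its arguments observably).

-- ===== PORT A =====
-- generate_tags() is a finite generator yielding exactly the 702 strings 'a'..'z','aa'..'zz';
-- it is modeled by its output list `tagList` plus a Nat cursor, next() = tagList.getD cursor ""
-- (the getD default is never read: generator exhaustion is excluded by Pre_).
def lettersPV : List Char := "abcdefghijklmnopqrstuvwxyz".toList

def tagList : List String :=
  lettersPV.map (fun c => String.ofList [c]) ++
  lettersPV.flatMap (fun a => lettersPV.map (fun b => String.ofList [a, b]))

-- the body of A's `for i, (urgency, desc) in enumerate(tasks)` loop; state = (pages, tag cursor, current_page)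
def stepA (per_page : Int)
    (st : List (List (String × Int × String)) × Nat × List (String × Int × String))
    (it : Int × Int × String) :
    List (List (String × Int × String)) × Nat × List (String × Int × String) :=
  let (pages, tg, cur) := st
  let (i, urgency, desc) := it
  let (pages, tg, cur) :=
    if PySem.Int.mod i per_page = 0 ∧ cur ≠ [] then (pages ++ [cur], 0, ([] : List (String × Int × String)))
    else (pages, tg, cur)
  let tag := tagList.getD tg ""
  (pages, tg + 1, cur ++ [(tag, urgency, desc)])

-- the trailing `if current_page: pages.append(current_page)`
def finishA (fin : List (List (String × Int × String)) × Nat × List (String × Int × String)) :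
    List (List (String × Int × String)) :=
  if fin.2.2 ≠ [] then fin.1 ++ [fin.2.2] else fin.1

def paginate_urgency_tasks (tasks : List (Int × String)) (per_page : Int) :
    List (List (String × Int × String)) :=
  finishA ((PySem.List.enumerate tasks 0).foldl (stepA per_page) ([], 0, []))

-- ===== PORT B =====
-- B's `while tasks:` loop; fuel = initial length only makes the recursion total
-- (inside Pre_, per_page ≥ 1, each round strictly shortens tasks, so fuel never runs out).
def pagesB (per_page : Int) :
    Nat → List (Int × String) → List (List (String × Int × String)) → List (List (String × Int × String))
  | 0, _, pages => pages
  | fuel + 1, tasks, pages =>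
    if tasks = [] then pages
    else
      let chunk := PySem.List.slice tasks none (some per_page)      -- tasks[:per_page]
      let rest := PySem.List.slice tasks (some per_page) none       -- tasks[per_page:]
      pagesB per_page fuel rest
        (pages ++ [(tagList.zip chunk).map (fun x => (x.1, x.2.1, x.2.2))])  -- zip(generate_tags(), chunk)

def paginate_urgency_tasks_alt (tasks : List (Int × String)) (per_page : Int) :
    List (List (String × Int × String)) :=
  pagesB per_page tasks.length tasks []

-- ===== PRECONDITION & SPEC =====
-- Pre_ keeps the natural domain: nonempty tasks require per_page ≥ 1 (per_page = 0 makes A raise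
-- ZeroDivisionError and any per_page ≤ 0 makes B loop forever; A's chunk-by-|per_page| value on a
-- negative per_page is an accident of `i % per_page == 0`), and per_page > 702 with more than 702
-- tasks is excluded because there A exhausts its 702-tag generator and raises StopIteration.
def Pre_paginate_urgency_tasks (tasks : List (Int × String)) (per_page : Int) : Prop :=
  tasks = [] ∨ (1 ≤ per_page ∧ (per_page ≤ 702 ∨ tasks.length ≤ 702))

instance (tasks : List (Int × String)) (per_page : Int) : Decidable (Pre_paginate_urgency_tasks tasks per_page) := by
  unfold Pre_paginate_urgency_tasks; infer_instance

def pvWitness_paginate_urgency_tasks : (List (Int × String)) × Int :=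
  ([(3, "a"), (1, "b"), (2, "c")], 2)

def Spec_paginate_urgency_tasks (tasks : List (Int × String)) (per_page : Int) (out : List (List (String × Int × String))) : Prop := out = paginate_urgency_tasks_alt tasks per_page
instance (tasks : List (Int × String)) (per_page : Int) (out : List (List (String × Int × String))) : Decidable (Spec_paginate_urgency_tasks tasks per_page out) := by unfold Spec_paginate_urgency_tasks; infer_instance

-- ===== CLAIM (what is proved, stated in full; the proofs are below) =====
def Claim_equal_paginate_urgency_tasks : Prop := ∀ (tasks : List (Int × String)) (per_page : Int), Dom_paginate_urgency_tasks tasks per_page → Pre_paginate_urgency_tasks tasks per_page → Spec_paginate_urgency_tasks tasks per_page (paginate_urgency_tasks tasks per_page)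

-- ===== LEMMAS AND PROOFS =====

-- A's current_page after consuming c with the tag cursor at k
def pageFrom (k : Nat) : List (Int × String) → List (String × Int × String)
  | [] => []
  | (u, d) :: rest => (tagList.getD k "", u, d) :: pageFrom (k + 1) rest

set_option maxRecDepth 8192 in
theorem tagList_length : tagList.length = 702 := by decide

theorem pageFrom_eq_zip : ∀ (c : List (Int × String)) (k : Nat), k + c.length ≤ 702 →
    ((tagList.drop k).zip c).map (fun x => (x.1, x.2.1, x.2.2)) = pageFrom k c := by
  intro c
  induction c with
  | nil => intro k _; simp [pageFrom]
  | cons y rest ih =>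
    intro k hk
    obtain ⟨u, d⟩ := y
    have hlt : k < tagList.length := by rw [tagList_length]; simp at hk; omega
    rw [List.drop_eq_getElem_cons hlt]
    simp only [List.zip_cons_cons, List.map_cons, pageFrom]
    rw [List.getD_eq_getElem tagList "" hlt, ih (k + 1) (by simp at hk ⊢; omega)]

theorem enumerate_append {α : Type} : ∀ (l1 l2 : List α) (s : Int),
    PySem.List.enumerate (l1 ++ l2) s
      = PySem.List.enumerate l1 s ++ PySem.List.enumerate l2 (s + l1.length) := by
  intro l1
  induction l1 with
  | nil => intro l2 s; simp [PySem.List.enumerate_nil]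
  | cons x xs ih =>
    intro l2 s
    simp only [List.cons_append, PySem.List.enumerate_cons, ih, List.length_cons]
    congr 2
    congr 1
    omega

theorem pagesB_nil (p : Int) : ∀ (f : Nat) (pages : List (List (String × Int × String))),
    pagesB p f [] pages = pages := by
  intro f pages; cases f <;> simp [pagesB]

theorem pagesB_fuel (p : Int) (hp : 1 ≤ p) : ∀ (f g : Nat) (xs : List (Int × String)) pages,
    xs.length ≤ f → xs.length ≤ g → pagesB p f xs pages = pagesB p g xs pages := by
  intro f
  induction f with
  | zero =>
    intro g xs pages hf _
    have : xs = [] := by cases xs <;> simp_all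
    subst this; rw [pagesB_nil, pagesB_nil]
  | succ f ih =>
    intro g xs pages hf hg
    by_cases hxs : xs = []
    · subst hxs; rw [pagesB_nil, pagesB_nil]
    · obtain ⟨g', rfl⟩ : ∃ g', g = g' + 1 := by
        cases g with
        | zero => exact absurd (Nat.le_zero.mp hg) (by simp [hxs])
        | succ g' => exact ⟨g', rfl⟩
      simp only [pagesB]
      simp only [if_neg hxs]
      apply ih
      · rw [PySem.List.slice_from xs (by omega)]
        simp only [List.length_drop]
        have := List.length_pos_iff.mpr hxs
        omega
      · rw [PySem.List.slice_from xs (by omega)]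
        simp only [List.length_drop]
        have := List.length_pos_iff.mpr hxs
        omega

-- the no-flush segment of a page: indices s+j with j < |ys| never hit i % per_page == 0
theorem foldl_no_flush (p : Int) : ∀ (ys : List (Int × String)) (s : Int)
    (pages : List (List (String × Int × String))) (cur : List (String × Int × String)) (tg : Nat),
    (∀ j : Nat, j < ys.length → PySem.Int.mod (s + j) p ≠ 0) →
    (PySem.List.enumerate ys s).foldl (stepA p) (pages, tg, cur)
      = (pages, tg + ys.length, cur ++ pageFrom tg ys) := by
  intro ys
  induction ys with
  | nil => intro s pages cur tg _; simp [PySem.List.enumerate_nil, pageFrom]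
  | cons y rest ih =>
    intro s pages cur tg hmod
    obtain ⟨u, d⟩ := y
    have h0 : PySem.Int.mod s p ≠ 0 := by
      have := hmod 0 (by simp)
      simpa using this
    rw [PySem.List.enumerate_cons]
    simp only [List.foldl_cons]
    have hstep : stepA p (pages, tg, cur) (s, u, d)
        = (pages, tg + 1, cur ++ [(tagList.getD tg "", u, d)]) := by
      simp [stepA, h0]
    rw [hstep, ih (s + 1) pages _ (tg + 1) (by
      intro j hj
      have hc : s + 1 + (j : Int) = s + ((j + 1 : Nat) : Int) := by push_cast; omega
      rw [hc]
      exact hmod (j + 1) (by simp; omega))]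
    simp only [pageFrom, List.length_cons, List.append_assoc, List.singleton_append]
    refine Prod.ext rfl (Prod.ext ?_ rfl)
    simp
    omega

-- one full round of A: from a fresh page state at a start index divisible by per_page,
-- the loop + trailing flush produce exactly B's while-loop pages
theorem main_loop (p : Int) (hp : 1 ≤ p) : ∀ (n : Nat) (xs : List (Int × String)),
    xs.length ≤ n → (p ≤ 702 ∨ xs.length ≤ 702) →
    ∀ (s : Int) (pages : List (List (String × Int × String))),
    PySem.Int.mod s p = 0 →
    finishA ((PySem.List.enumerate xs s).foldl (stepA p) (pages, 0, []))
      = pagesB p xs.length xs pages := by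
  intro n
  induction n with
  | zero =>
    intro xs hn _ s pages _
    have : xs = [] := by cases xs <;> simp_all
    subst this
    simp [PySem.List.enumerate_nil, finishA, pagesB]
  | succ n ih =>
    intro xs hn hcap s pages hs
    by_cases hxs : xs = []
    · subst hxs; simp [PySem.List.enumerate_nil, finishA, pagesB]
    · obtain ⟨⟨u, d⟩, rest, rfl⟩ : ∃ y rest, xs = y :: rest := by
        cases xs with
        | nil => exact absurd rfl hxs
        | cons y rest => exact ⟨y, rest, rfl⟩
      have hP1 : (1 : Int) ≤ p := hp
      set P : Nat := p.toNat with hPdef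
      have hPpos : 1 ≤ P := by omega
      have hPcast : (P : Int) = p := by omega
      -- split rest into the remainder of the first chunk and the rest
      have hrest : rest = rest.take (P - 1) ++ rest.drop (P - 1) := (List.take_append_drop _ _).symm
      have hsdvd : p ∣ s := by
        rwa [← PySem.Int.mod_eq_zero_iff_dvd]
      -- first step: i = s, i % p == 0 but current_page is empty → no flush
      rw [PySem.List.enumerate_cons]
      simp only [List.foldl_cons]
      have hstep1 : stepA p ((pages, 0, []) :
            List (List (String × Int × String)) × Nat × List (String × Int × String)) (s, u, d)
          = (pages, 1, [(tagList.getD 0 "", u, d)]) := by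
        simp [stepA]
      rw [hstep1]
      -- the rest of the first chunk: no flush
      conv_lhs => rw [hrest]
      rw [enumerate_append]
      rw [List.foldl_append]
      have htklen : (rest.take (P - 1)).length ≤ P - 1 := by
        simp [List.length_take]
      rw [foldl_no_flush p (rest.take (P - 1)) (s + 1) pages _ 1 (by
        intro j hj
        have hjP : j + 1 < P := by omega
        have : PySem.Int.mod (s + 1 + (j : Int)) p = ((j : Int) + 1) % p := by
          rw [PySem.Int.mod_eq_emod_of_pos (by omega)]
          obtain ⟨q, rfl⟩ := hsdvd
          have : p * q + 1 + (j : Int) = ((j : Int) + 1) + q * p := by ring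
          rw [this, Int.add_mul_emod_self_right]
        rw [this, Int.emod_eq_of_lt (by omega) (by omega)]
        omega)]
      have hpage : ([(tagList.getD 0 "", u, d)] : List (String × Int × String))
            ++ pageFrom 1 (rest.take (P - 1)) = pageFrom 0 ((u, d) :: rest.take (P - 1)) := by
        simp [pageFrom]
      have hchunk : PySem.List.slice ((u, d) :: rest) none (some p)
          = (u, d) :: rest.take (P - 1) := by
        rw [PySem.List.slice_to _ (by omega)]
        cases hPP : P with
        | zero => omega
        | succ k =>
          have : p.toNat = k + 1 := hPP
          simp [← hPdef, hPP, List.take_succ_cons]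
      have hrest' : PySem.List.slice ((u, d) :: rest) (some p) none = rest.drop (P - 1) := by
        rw [PySem.List.slice_from _ (by omega)]
        cases hPP : P with
        | zero => omega
        | succ k =>
          simp [← hPdef, hPP, List.drop_succ_cons]
      have hchunklen : ((u, d) :: rest.take (P - 1)).length ≤ 702 := by
        simp only [List.length_cons, List.length_take]
        rcases hcap with h | h
        · omega
        · simp only [List.length_cons] at h; omega
      have hzip : (tagList.zip ((u, d) :: rest.take (P - 1))).map (fun x => (x.1, x.2.1, x.2.2))
          = pageFrom 0 ((u, d) :: rest.take (P - 1)) := by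
        have := pageFrom_eq_zip ((u, d) :: rest.take (P - 1)) 0 (by omega)
        simpa using this
      by_cases hdrop : rest.drop (P - 1) = []
      · -- last chunk: trailing flush emits the current page
        rw [hdrop]
        simp only [PySem.List.enumerate_nil, List.foldl_nil, finishA]
        rw [hpage]
        have hne : pageFrom 0 ((u, d) :: rest.take (P - 1)) ≠ [] := by simp [pageFrom]
        rw [if_pos hne]
        -- B side
        conv_rhs => rw [show ((u,d) :: rest).length = rest.length + 1 from by simp]
        simp only [pagesB]
        rw [if_neg (by simp : ¬((u, d) :: rest = []))]
        rw [hchunk, hrest', hdrop, pagesB_nil, hzip]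
      · -- next index s + P starts a fresh chunk: the flush inside stepA equals restarting the state
        have hlen1 : (rest.take (P - 1)).length = P - 1 := by
          have : P - 1 ≤ rest.length := by
            by_contra hcon
            exact hdrop (List.drop_eq_nil_of_le (by omega))
          simp [List.length_take]; omega
        obtain ⟨⟨u', d'⟩, dl', hdl⟩ : ∃ y' dl', rest.drop (P - 1) = y' :: dl' := by
          cases hdd : rest.drop (P - 1) with
          | nil => exact absurd hdd hdrop
          | cons y' dl' => exact ⟨y', dl', rfl⟩
        rw [hdl, PySem.List.enumerate_cons]
        simp only [List.foldl_cons]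
        have hidx : s + 1 + ((rest.take (P - 1)).length : Int) = s + P := by
          rw [hlen1]; omega
        have hmodsp : PySem.Int.mod (s + P) p = 0 := by
          rw [PySem.Int.mod_eq_zero_iff_dvd]
          obtain ⟨q, rfl⟩ := hsdvd
          exact ⟨q + 1, by rw [hPcast]; ring⟩
        have hflush : stepA p (pages, 1 + (rest.take (P - 1)).length,
              [(tagList.getD 0 "", u, d)] ++ pageFrom 1 (rest.take (P - 1))) (s + P, u', d')
            = stepA p (pages ++ [[(tagList.getD 0 "", u, d)] ++ pageFrom 1 (rest.take (P - 1))],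
              0, []) (s + P, u', d') := by
          simp [stepA, hmodsp]
        rw [hidx, hflush, ← List.foldl_cons, ← PySem.List.enumerate_cons]
        -- recurse on the remaining tasks
        have hrec := ih (rest.drop (P - 1)) (by
            have := List.length_drop (l := rest) (i := P - 1)
            simp at hn ⊢; omega)
          (by
            rcases hcap with h | h
            · exact Or.inl h
            · right; simp at h ⊢; omega)
          (s + P) (pages ++ [[(tagList.getD 0 "", u, d)] ++ pageFrom 1 (rest.take (P - 1))]) hmodsp
        rw [hdl] at hrec
        rw [hrec]
        -- B side: one unfolding of the while loop
        conv_rhs => rw [show ((u,d) :: rest).length = rest.length + 1 from by simp]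
        simp only [pagesB, if_neg (by simp : ¬((u, d) :: rest = []))]
        rw [hchunk, hrest', hzip, hpage, hdl]
        apply pagesB_fuel p hp
        · simp
        · have hlen := congrArg List.length hdl
          simp only [List.length_drop, List.length_cons] at hlen
          simp only [List.length_cons]
          omega

-- ===== VERDICT (by name: the statement is the Claim_ definition above) =====
theorem paginate_urgency_tasks_spec : Claim_equal_paginate_urgency_tasks := by
  intro tasks per_page _ hpre
  unfold Spec_paginate_urgency_tasks
  rcases hpre with rfl | ⟨hp, hcap⟩
  · rfl
  · have hcap' : per_page ≤ 702 ∨ tasks.length ≤ 702 := hcap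
    unfold paginate_urgency_tasks paginate_urgency_tasks_alt
    exact main_loop per_page hp tasks.length tasks le_rfl hcap'
      0 [] (by rw [PySem.Int.mod_eq_emod_of_pos (by omega)]; simp)
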